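-- pv_equiv track=rewrite | github.com/nassermohamedit/coding-problems | codeforces/swap_and_delete.py | solve
-- ===== SOURCE A (Python) =====
-- def solve(s):
--     zeros = 0
--     ones = 0
--     for c in s:
--         if c == '0':
--             zeros += 1
--         else:
--             ones += 1
--     if zeros == ones:
--         return 0
--     for c in s:
--         if c == '0':
--             ones -= 1
--         else:
--             zeros -= 1
--         if zeros < 0 or ones < 0:
--             break
--     return zeros + ones + 1
-- ===== SOURCE B (Python) =====
-- def solve(s):
--     n = len(s)
--     zeros = sum(1 for c in s if c == '0')
--     ones = n - zeros
--     if zeros == ones: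
--         return 0
--     m = min(zeros, ones)
--     # indices of the majority-class characters ('0' vs non-'0'); the (m+1)-th
--     # one is where A's budget scan breaks, so the answer is n minus its index
--     hits = [i for i, c in enumerate(s) if (c == '0') == (zeros > ones)]
--     return n - hits[m]
-- ===== Notes on version B (the rewrite author's own statement) =====
-- stated objective: alternative
-- what changed: A's answer is recomputed as n minus the index of the (m+1)-th majority-class character (m = minority count): B counts '0's once, then builds the enumerated list of majority-class indices and picks the m-th, instead of A's scan that decrements two budgets and breaks when one goes negative.
import Mathlib
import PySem

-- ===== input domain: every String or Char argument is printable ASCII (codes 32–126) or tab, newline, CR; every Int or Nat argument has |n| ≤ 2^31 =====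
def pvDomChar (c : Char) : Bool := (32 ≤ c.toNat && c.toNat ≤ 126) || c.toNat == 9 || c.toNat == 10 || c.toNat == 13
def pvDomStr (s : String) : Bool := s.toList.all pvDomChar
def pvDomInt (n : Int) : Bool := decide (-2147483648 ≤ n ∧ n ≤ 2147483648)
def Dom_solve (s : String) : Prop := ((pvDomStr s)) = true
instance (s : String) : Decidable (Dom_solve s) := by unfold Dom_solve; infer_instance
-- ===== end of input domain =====

-- B replaces A's two-budget decrement-and-break scan by counting '0's once and
-- picking the (m+1)-th majority-class index from an enumerated filter (objective: alternative).


-- ===== PORT A =====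
-- second loop of A: decrement budgets, break as soon as one goes negative
def solveLoop2 : List Char → Int → Int → Int
  | [], z, o => z + o + 1
  | c :: rest, z, o =>
    let z' := if c = '0' then z else z - 1
    let o' := if c = '0' then o - 1 else o
    if z' < 0 ∨ o' < 0 then z' + o' + 1 else solveLoop2 rest z' o'

def solve (s : String) : Int :=
  let p := s.toList.foldl (fun (p : Int × Int) c => if c = '0' then (p.1 + 1, p.2) else (p.1, p.2 + 1)) (0, 0)
  if p.1 = p.2 then 0 else solveLoop2 s.toList p.1 p.2

-- ===== PORT B =====
def solve_alt (s : String) : Int :=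
  let cs := s.toList
  let n : Int := cs.length
  let zeros : Int := cs.foldl (fun a c => if c == '0' then a + 1 else a) 0
  let ones : Int := n - zeros
  if zeros = ones then 0
  else
    let m := min zeros ones
    let hits := (PySem.List.enumerate cs).filter (fun ic => (ic.2 == '0') == decide (zeros > ones))
    -- hits[m] : provably in range here, so the .getD default is never used
    n - (((PySem.List.pyGet? hits m).map Prod.fst).getD 0)

-- ===== PRECONDITION & SPEC =====
def Spec_solve (s : String) (out : Int) : Prop := out = solve_alt s
instance (s : String) (out : Int) : Decidable (Spec_solve s out) := by unfold Spec_solve; infer_instance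

-- ===== CLAIM (what is proved, stated in full; the proofs are below) =====
def Claim_equal_solve : Prop := ∀ (s : String), Dom_solve s → Spec_solve s (solve s)

-- ===== LEMMAS AND PROOFS =====

theorem fold1_eq (cs : List Char) : ∀ z o : Int,
    cs.foldl (fun (p : Int × Int) c => if c = '0' then (p.1 + 1, p.2) else (p.1, p.2 + 1)) (z, o)
      = (z + cs.count '0', o + ((cs.length : Int) - cs.count '0')) := by
  induction cs with
  | nil => intro z o; simp
  | cons c rest ih =>
    intro z o
    by_cases h : c = '0' <;>
      simp [List.foldl_cons, h, ih] <;> omega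

theorem pyGet?_cons_pos {α : Type} (x : α) (xs : List α) (i : Int) (h : 1 ≤ i) :
    PySem.List.pyGet? (x :: xs) i = PySem.List.pyGet? xs (i - 1) := by
  rw [PySem.List.pyGet?_of_nonneg (x :: xs) (by omega),
      PySem.List.pyGet?_of_nonneg xs (by omega)]
  have hi : i.toNat = (i - 1).toNat + 1 := by omega
  rw [hi, List.getElem?_cons_succ]

theorem loop2_step_zero (rest : List Char) (z o : Int) (hz : ¬(z < 0 ∨ o - 1 < 0)) :
    solveLoop2 ('0' :: rest) z o = solveLoop2 rest z (o - 1) := by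
  simp only [solveLoop2, if_true]
  rw [if_neg hz]

theorem loop2_step_one (c : Char) (rest : List Char) (z o : Int) (hc : ¬ c = '0')
    (hz : ¬(z - 1 < 0 ∨ o < 0)) :
    solveLoop2 (c :: rest) z o = solveLoop2 rest (z - 1) o := by
  simp only [solveLoop2, if_neg hc]
  rw [if_neg hz]

theorem loop2_break_zero (rest : List Char) (z : Int) :
    solveLoop2 ('0' :: rest) z 0 = z := by
  simp [solveLoop2]

theorem loop2_break_one (c : Char) (rest : List Char) (o : Int) (hc : ¬ c = '0') :
    solveLoop2 (c :: rest) 0 o = o := by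
  simp [solveLoop2, hc]

theorem loop2_zero : ∀ (cs : List Char) (z o : Int) (k : Int),
    0 ≤ o → o < (cs.count '0' : Int) → ((cs.length : Int) - cs.count '0') ≤ z →
    solveLoop2 cs z o = z + o + k -
      (((PySem.List.pyGet? ((PySem.List.enumerate cs k).filter (fun ic => ic.2 == '0')) o).map Prod.fst).getD 0) := by
  intro cs
  induction cs with
  | nil => intro z o k h0 h1 _; simp at h1; omega
  | cons c rest ih =>
    intro z o k h0 h1 h2
    have hcnt : rest.count '0' ≤ rest.length := List.count_le_length
    by_cases hc : c = '0'
    · subst hc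
      have hcc : (List.count '0' ('0' :: rest) : Int) = rest.count '0' + 1 := by
        simp [List.count_cons_self]
      rw [List.length_cons] at h2; push_cast at h2; rw [hcc] at h1 h2
      rw [PySem.List.enumerate_cons]
      rw [show (List.filter (fun ic => ic.2 == '0') ((k, '0') :: PySem.List.enumerate rest (k + 1)))
            = (k, '0') :: List.filter (fun ic => ic.2 == '0') (PySem.List.enumerate rest (k + 1)) by
          simp]
      by_cases ho : o = 0
      · subst ho
        rw [loop2_break_zero, PySem.List.pyGet?_zero_cons]
        simp
      · rw [loop2_step_zero rest z o (by omega)]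
        rw [pyGet?_cons_pos _ _ o (by omega)]
        rw [ih z (o - 1) (k + 1) (by omega) (by omega) (by omega)]
        ring
    · have hbc : (c == '0') = false := by simp [hc]
      have hcc : (List.count '0' (c :: rest) : Int) = rest.count '0' := by
        simp [hc]
      rw [List.length_cons] at h2; push_cast at h2; rw [hcc] at h1 h2
      rw [PySem.List.enumerate_cons]
      rw [show (List.filter (fun ic => ic.2 == '0') ((k, c) :: PySem.List.enumerate rest (k + 1)))
            = List.filter (fun ic => ic.2 == '0') (PySem.List.enumerate rest (k + 1)) by
          simp [hbc]]
      rw [loop2_step_one c rest z o hc (by omega)]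
      rw [ih (z - 1) o (k + 1) h0 (by omega) (by omega)]
      ring

theorem loop2_one : ∀ (cs : List Char) (z o : Int) (k : Int),
    0 ≤ z → z < (cs.countP (fun c => !(c == '0')) : Int) → ((cs.count '0' : Int)) ≤ o →
    solveLoop2 cs z o = z + o + k -
      (((PySem.List.pyGet? ((PySem.List.enumerate cs k).filter (fun ic => !(ic.2 == '0'))) z).map Prod.fst).getD 0) := by
  intro cs
  induction cs with
  | nil => intro z o k h0 h1 _; simp at h1; omega
  | cons c rest ih =>
    intro z o k h0 h1 h2
    by_cases hc : c = '0'
    · subst hc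
      have hP : (List.countP (fun c => !(c == '0')) ('0' :: rest) : Int)
          = rest.countP (fun c => !(c == '0')) := by
        simp
      have hcc : (List.count '0' ('0' :: rest) : Int) = rest.count '0' + 1 := by
        simp [List.count_cons_self]
      rw [hP] at h1; rw [hcc] at h2
      have hrc : (0 : Int) ≤ rest.count '0' := by positivity
      rw [PySem.List.enumerate_cons]
      rw [show (List.filter (fun ic => !(ic.2 == '0')) ((k, '0') :: PySem.List.enumerate rest (k + 1)))
            = List.filter (fun ic => !(ic.2 == '0')) (PySem.List.enumerate rest (k + 1)) by
          simp]
      rw [loop2_step_zero rest z o (by omega)]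
      rw [ih z (o - 1) (k + 1) h0 (by omega) (by omega)]
      ring
    · have hbc : (!(c == '0')) = true := by simp [hc]
      have hP : (List.countP (fun c => !(c == '0')) (c :: rest) : Int)
          = rest.countP (fun c => !(c == '0')) + 1 := by
        simp [hbc]
      have hcc : (List.count '0' (c :: rest) : Int) = rest.count '0' := by
        simp [hc]
      rw [hP] at h1; rw [hcc] at h2
      have hrc : (0 : Int) ≤ rest.count '0' := by positivity
      rw [PySem.List.enumerate_cons]
      rw [show (List.filter (fun ic => !(ic.2 == '0')) ((k, c) :: PySem.List.enumerate rest (k + 1)))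
            = (k, c) :: List.filter (fun ic => !(ic.2 == '0')) (PySem.List.enumerate rest (k + 1)) by
          simp [hbc]]
      by_cases hzz : z = 0
      · subst hzz
        rw [loop2_break_one c rest o hc, PySem.List.pyGet?_zero_cons]
        simp
      · rw [loop2_step_one c rest z o hc (by omega)]
        rw [pyGet?_cons_pos _ _ z (by omega)]
        rw [ih (z - 1) o (k + 1) (by omega) (by omega) h2]
        ring

-- ===== VERDICT (by name: the statement is the Claim_ definition above) =====
theorem solve_spec : Claim_equal_solve := by
  intro s _
  unfold Spec_solve solve solve_alt
  have hfold := fold1_eq s.toList 0 0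
  have hcl : (s.toList.count '0' : Int) ≤ (s.toList.length : Int) := by
    exact_mod_cast List.count_le_length
  have hc0 : (0 : Int) ≤ (s.toList.count '0' : Int) := by positivity
  have hsplit : (s.toList.countP (fun c => !(c == '0')) : Int)
      = (s.toList.length : Int) - s.toList.count '0' := by
    have h1 : s.toList.length
        = s.toList.countP (fun c => c == '0') + s.toList.countP (fun c => !(c == '0')) := by
      have := List.length_eq_countP_add_countP (p := fun c => c == '0') (l := s.toList)
      simpa using this
    have h2 : s.toList.count '0' = s.toList.countP (fun c => c == '0') := by
      simp [List.count]
    omega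
  have hlen : s.toList.length = s.length := by simp
  simp only [hfold, PySem.List.foldl_beq_add_one, zero_add, hlen]
  by_cases heq : (s.toList.count '0' : Int) = (s.length : Int) - s.toList.count '0'
  · rw [if_pos heq, if_pos heq]
  · rw [if_neg heq, if_neg heq]
    by_cases hgt : (s.length : Int) - s.toList.count '0' < s.toList.count '0'
    · have hd : decide ((s.toList.count '0' : Int) > (s.length : Int) - s.toList.count '0')
          = true := decide_eq_true hgt
      have hmin : min (s.toList.count '0' : Int) ((s.length : Int) - s.toList.count '0')
          = (s.length : Int) - s.toList.count '0' := by omega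
      rw [loop2_zero s.toList _ _ 0 (by omega) (by omega) (by omega)]
      simp only [hd, hmin, beq_true]
      ring
    · have hlt : (s.toList.count '0' : Int) < (s.length : Int) - s.toList.count '0' := by
        omega
      have hd : decide ((s.toList.count '0' : Int) > (s.length : Int) - s.toList.count '0')
          = false := by
        apply decide_eq_false; omega
      have hmin : min (s.toList.count '0' : Int) ((s.length : Int) - s.toList.count '0')
          = (s.toList.count '0' : Int) := by omega
      rw [loop2_one s.toList _ _ 0 (by omega) (by omega) (by omega)]
      simp only [hd, hmin, beq_false]
      ring
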